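-- pv_equiv track=rewrite | github.com/ILoveMath111/PyrhonClasses | HomeworkClass21.py | square_it_out
-- ===== SOURCE A (Python) =====
-- def square_it_out(start_range, end_range):
--     # Create an empty list to store the square values
--     squared_values = []
--     # Create empty lists to store the odd and even squared values
--     odd_squares = []
--     even_squares = []
--
--     # Iterate through the specified range (inclusive of start and exclusive of end+1 for range() behavior)
--     for number in range(start_range, end_range + 1):
--         # Calculate the square of the number
--         square = number ** 2
--         # Append the square to the main list
--         squared_values.append(square)
--
--         # Check if the square is even or odd using the modulus operator
--         if square % 2 == 0:
--             even_squares.append(square)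
--         else:
--             odd_squares.append(square)
--
--     return squared_values, odd_squares, even_squares
-- ===== SOURCE B (Python) =====
-- def _interleave(xs, ys):
--     # xs and ys alternate starting with xs; here their lengths differ by at most 1
--     out = []
--     n = min(len(xs), len(ys))
--     for i in range(n):
--         out.append(xs[i])
--         out.append(ys[i])
--     out.extend(xs[n:])
--     out.extend(ys[n:])
--     return out
--
--
-- def square_it_out(start_range, end_range):
--     # A square is even iff its base is even, so the two parity classes are
--     # exactly the squares of two stride-2 arithmetic ranges: no parity test
--     # on squares, and the full list is the interleaving of the two classes.
--     start_is_even = start_range % 2 == 0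
--     first_even = start_range if start_is_even else start_range + 1
--     first_odd = start_range + 1 if start_is_even else start_range
--     even_squares = [n * n for n in range(first_even, end_range + 1, 2)]
--     odd_squares = [n * n for n in range(first_odd, end_range + 1, 2)]
--     if start_is_even:
--         squares = _interleave(even_squares, odd_squares)
--     else:
--         squares = _interleave(odd_squares, even_squares)
--     return squares, odd_squares, even_squares
-- ===== Notes on version B (the rewrite author's own statement) =====
-- stated objective: alternative
-- what changed: Instead of one loop that squares each number and tests each square's parity, B generates the even and odd squares directly from two stride-2 ranges (a square's parity equals its base's parity) and reconstructs the full squares list by interleaving the two class lists, so no parity test on squares is performed.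
import Mathlib
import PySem

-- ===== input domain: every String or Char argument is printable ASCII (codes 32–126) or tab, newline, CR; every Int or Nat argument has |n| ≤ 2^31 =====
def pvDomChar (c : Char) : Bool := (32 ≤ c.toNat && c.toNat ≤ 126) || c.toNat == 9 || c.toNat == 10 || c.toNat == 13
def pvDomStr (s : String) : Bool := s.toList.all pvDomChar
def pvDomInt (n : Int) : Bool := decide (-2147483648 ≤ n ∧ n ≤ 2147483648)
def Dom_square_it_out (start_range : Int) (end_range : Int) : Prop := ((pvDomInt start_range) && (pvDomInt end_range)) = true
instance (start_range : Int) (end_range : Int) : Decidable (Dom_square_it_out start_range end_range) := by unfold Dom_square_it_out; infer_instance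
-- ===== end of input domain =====

-- B replaces A's squaring loop with a per-square parity test by two stride-2
-- ranges (squares of even/odd bases) interleaved back into the full list (alternative).

-- ===== PORT A =====
-- A: one pass over range(start, end+1), appending square to the main list and to
-- the even/odd list chosen by square % 2 == 0.
def pvStepA (acc : List Int × List Int × List Int) (number : Int) : List Int × List Int × List Int :=
  let square := number ^ 2
  let squared_values := acc.1 ++ [square]
  if PySem.Int.mod square 2 == 0 then
    (squared_values, acc.2.1, acc.2.2 ++ [square])
  else
    (squared_values, acc.2.1 ++ [square], acc.2.2)

def square_it_out (start_range : Int) (end_range : Int) : List Int × List Int × List Int :=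
  (PySem.List.pyRange start_range (end_range + 1) 1).foldl pvStepA ([], [], [])

-- ===== PORT B =====
-- _interleave(xs, ys): pairwise loop over the common prefix, then the tails.
def pvInterleave (xs ys : List Int) : List Int :=
  let n := min xs.length ys.length
  (List.zipWith (fun x y => [x, y]) xs ys).flatten ++ xs.drop n ++ ys.drop n

-- B: even and odd squares from two stride-2 ranges, full list by interleaving.
def square_it_out_alt (start_range : Int) (end_range : Int) : List Int × List Int × List Int :=
  let start_is_even := PySem.Int.mod start_range 2 == 0
  let first_even := if start_is_even then start_range else start_range + 1
  let first_odd := if start_is_even then start_range + 1 else start_range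
  let even_squares := (PySem.List.pyRange first_even (end_range + 1) 2).map (fun n => n * n)
  let odd_squares := (PySem.List.pyRange first_odd (end_range + 1) 2).map (fun n => n * n)
  let squares := if start_is_even then pvInterleave even_squares odd_squares
                 else pvInterleave odd_squares even_squares
  (squares, odd_squares, even_squares)

-- ===== PRECONDITION & SPEC =====
def Spec_square_it_out (start_range : Int) (end_range : Int) (out : List Int × List Int × List Int) : Prop := out = square_it_out_alt start_range end_range
instance (start_range : Int) (end_range : Int) (out : List Int × List Int × List Int) : Decidable (Spec_square_it_out start_range end_range out) := by unfold Spec_square_it_out; infer_instance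

-- ===== CLAIM (what is proved, stated in full; the proofs are below) =====
def Claim_equal_square_it_out : Prop := ∀ (start_range : Int) (end_range : Int), Dom_square_it_out start_range end_range → Spec_square_it_out start_range end_range (square_it_out start_range end_range)

-- ===== LEMMAS AND PROOFS =====

-- A's fold over any number list equals the map-then-filter shape, for any initial accumulators.
theorem square_fold_eq (l : List Int) (s o e : List Int) :
    l.foldl pvStepA (s, o, e)
    = (s ++ l.map (fun n => n ^ 2),
       o ++ (l.map (fun n => n ^ 2)).filter (fun x => PySem.Int.mod x 2 != 0),
       e ++ (l.map (fun n => n ^ 2)).filter (fun x => PySem.Int.mod x 2 == 0)) := by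
  induction l generalizing s o e with
  | nil => simp
  | cons n t ih =>
    rw [List.foldl_cons, List.map_cons, List.filter_cons, List.filter_cons]
    by_cases h : (PySem.Int.mod (n ^ 2) 2 == 0) = true
    · rw [show pvStepA (s, o, e) n = (s ++ [n ^ 2], o, e ++ [n ^ 2]) by
        simp only [pvStepA]; rw [if_pos h]]
      rw [ih]
      have h' : (PySem.Int.mod (n ^ 2) 2 != 0) = false := by
        simp only [bne, h, Bool.not_true]
      rw [h', if_neg (by simp), if_pos h]
      simp
    · rw [show pvStepA (s, o, e) n = (s ++ [n ^ 2], o ++ [n ^ 2], e) by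
        simp only [pvStepA]; rw [if_neg h]]
      rw [ih]
      have h' : (PySem.Int.mod (n ^ 2) 2 != 0) = true := by
        simp only [bne, h, Bool.not_false]
      rw [if_pos h', if_neg h]
      simp

-- Python's % with the positive divisor 2 is Int.emod.
theorem pymod_two (a : Int) : PySem.Int.mod a 2 = a % 2 := by
  simp [PySem.Int.mod, Int.fmod_eq_emod]

-- A square has the parity of its base.
theorem sq_mod_two (n : Int) : PySem.Int.mod (n * n) 2 = PySem.Int.mod n 2 := by
  rw [pymod_two, pymod_two, Int.mul_emod]
  rcases Int.emod_two_eq n with h | h <;> rw [h] <;> norm_num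

-- stride-2 range: empty and cons forms.
theorem pyRange2_nil {a c : Int} (h : c ≤ a) : PySem.List.pyRange a c 2 = [] := by
  rw [PySem.List.pyRange_of_pos a c (by norm_num)]
  rw [if_neg (by omega)]
  simp

theorem pyRange2_cons {a c : Int} (h : a < c) :
    PySem.List.pyRange a c 2 = a :: PySem.List.pyRange (a + 2) c 2 := by
  rw [PySem.List.pyRange_of_pos a c (by norm_num),
      PySem.List.pyRange_of_pos (a + 2) c (by norm_num), if_pos h]
  have hn : ((c - a + 2 - 1) / 2).toNat
      = (if a + 2 < c then ((c - (a + 2) + 2 - 1) / 2).toNat else 0) + 1 := by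
    split_ifs with h2 <;> omega
  rw [hn, List.range_succ_eq_map, List.map_cons, List.map_map]
  simp only [Nat.cast_zero, mul_zero, add_zero, List.cons.injEq, true_and]
  apply List.map_congr_left
  intro k _
  simp only [Function.comp_apply, Nat.succ_eq_add_one]
  push_cast
  ring

-- pvInterleave recursion equations.
theorem pvInterleave_nil_left (ys : List Int) : pvInterleave [] ys = ys := by
  simp [pvInterleave]

theorem pvInterleave_nil_right (xs : List Int) : pvInterleave xs [] = xs := by
  simp [pvInterleave]

theorem pvInterleave_cons (x y : Int) (xs ys : List Int) :
    pvInterleave (x :: xs) (y :: ys) = x :: y :: pvInterleave xs ys := by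
  simp [pvInterleave, Nat.succ_min_succ, List.drop_succ_cons]

-- range(a, c) is the interleaving of the two stride-2 ranges starting at a and a+1.
theorem range_interleave (c : Int) : ∀ (n : Nat) (a : Int), (c - a).toNat = n →
    PySem.List.pyRange a c 1
      = pvInterleave (PySem.List.pyRange a c 2) (PySem.List.pyRange (a + 1) c 2) := by
  intro n
  induction n using Nat.strong_induction_on with
  | _ n ih =>
    intro a hn
    by_cases h1 : a < c
    · rw [PySem.List.pyRange_one_cons h1, pyRange2_cons h1]
      by_cases h2 : a + 1 < c
      · rw [pyRange2_cons h2, pvInterleave_cons,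
            PySem.List.pyRange_one_cons h2]
        have e2 : a + 1 + 1 = a + 2 := by ring
        have e3 : a + 1 + 2 = a + 2 + 1 := by ring
        rw [e2, e3, ih ((c - (a + 2)).toNat) (by omega) (a + 2) rfl]
      · rw [pyRange2_nil (show c ≤ a + 1 by omega), pvInterleave_nil_right,
            pyRange2_nil (show c ≤ a + 2 by omega),
            PySem.List.pyRange_one_eq_nil (show c ≤ a + 1 by omega)]
    · rw [PySem.List.pyRange_one_eq_nil (show c ≤ a by omega),
          pyRange2_nil (show c ≤ a by omega), pvInterleave_nil_left,
          pyRange2_nil (show c ≤ a + 1 by omega)]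

-- map distributes over pvInterleave.
theorem map_pvInterleave (f : Int → Int) (xs ys : List Int) :
    (pvInterleave xs ys).map f = pvInterleave (xs.map f) (ys.map f) := by
  induction xs generalizing ys with
  | nil => simp [pvInterleave_nil_left]
  | cons x xs ih =>
    cases ys with
    | nil => simp [pvInterleave_nil_right]
    | cons y ys => simp [pvInterleave_cons, ih]

-- the even squares of range(a, c) are the squares of the stride-2 range from the first even base.
theorem filter_even_sq (c : Int) : ∀ (n : Nat) (a : Int), (c - a).toNat = n →
    ((PySem.List.pyRange a c 1).map (fun n => n * n)).filter (fun x => PySem.Int.mod x 2 == 0)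
      = (PySem.List.pyRange (if PySem.Int.mod a 2 == 0 then a else a + 1) c 2).map (fun n => n * n) := by
  intro n
  induction n with
  | zero =>
    intro a hn
    rw [PySem.List.pyRange_one_eq_nil (by omega)]
    split_ifs <;> rw [pyRange2_nil (by omega)] <;> simp
  | succ n ih =>
    intro a hn
    have h1 : a < c := by omega
    rw [PySem.List.pyRange_one_cons h1, List.map_cons, List.filter_cons,
        ih (a + 1) (by omega)]
    have hab : PySem.Int.mod (a + 1) 2 = 1 - PySem.Int.mod a 2 := by
      rw [pymod_two, pymod_two]; omega
    rcases PySem.Int.mod_two_eq a with h | h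
    · have hA : (PySem.Int.mod a 2 == 0) = true := by rw [h]; rfl
      have hA1 : (PySem.Int.mod (a + 1) 2 == 0) = false := by rw [hab, h]; rfl
      have hSq : (PySem.Int.mod (a * a) 2 == 0) = true := by rw [sq_mod_two, h]; rfl
      simp only [hA, hA1, hSq, if_true, Bool.false_eq_true, if_false]
      rw [pyRange2_cons h1, List.map_cons]
      have e2 : a + 1 + 1 = a + 2 := by ring
      rw [e2]
    · have hA : (PySem.Int.mod a 2 == 0) = false := by rw [h]; rfl
      have hA1 : (PySem.Int.mod (a + 1) 2 == 0) = true := by rw [hab, h]; rfl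
      have hSq : (PySem.Int.mod (a * a) 2 == 0) = false := by rw [sq_mod_two, h]; rfl
      simp only [hA, hA1, hSq, if_true, Bool.false_eq_true, if_false]

-- the odd squares of range(a, c) are the squares of the stride-2 range from the first odd base.
theorem filter_odd_sq (c : Int) : ∀ (n : Nat) (a : Int), (c - a).toNat = n →
    ((PySem.List.pyRange a c 1).map (fun n => n * n)).filter (fun x => PySem.Int.mod x 2 != 0)
      = (PySem.List.pyRange (if PySem.Int.mod a 2 == 0 then a + 1 else a) c 2).map (fun n => n * n) := by
  intro n
  induction n with
  | zero =>
    intro a hn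
    rw [PySem.List.pyRange_one_eq_nil (by omega)]
    split_ifs <;> rw [pyRange2_nil (by omega)] <;> simp
  | succ n ih =>
    intro a hn
    have h1 : a < c := by omega
    rw [PySem.List.pyRange_one_cons h1, List.map_cons, List.filter_cons,
        ih (a + 1) (by omega)]
    have hab : PySem.Int.mod (a + 1) 2 = 1 - PySem.Int.mod a 2 := by
      rw [pymod_two, pymod_two]; omega
    rcases PySem.Int.mod_two_eq a with h | h
    · have hA : (PySem.Int.mod a 2 == 0) = true := by rw [h]; rfl
      have hA1 : (PySem.Int.mod (a + 1) 2 == 0) = false := by rw [hab, h]; rfl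
      have hSq : (PySem.Int.mod (a * a) 2 != 0) = false := by rw [sq_mod_two, h]; rfl
      simp only [hA, hA1, hSq, if_true, Bool.false_eq_true, if_false]
    · have hA : (PySem.Int.mod a 2 == 0) = false := by rw [h]; rfl
      have hA1 : (PySem.Int.mod (a + 1) 2 == 0) = true := by rw [hab, h]; rfl
      have hSq : (PySem.Int.mod (a * a) 2 != 0) = true := by rw [sq_mod_two, h]; rfl
      simp only [hA, hA1, hSq, if_true, Bool.false_eq_true, if_false]
      rw [pyRange2_cons h1, List.map_cons]
      have e2 : a + 1 + 1 = a + 2 := by ring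
      rw [e2]

-- ===== VERDICT (by name: the statement is the Claim_ definition above) =====
theorem square_it_out_spec : Claim_equal_square_it_out := by
  intro a b _
  show square_it_out a b = square_it_out_alt a b
  rw [square_it_out, square_fold_eq]
  simp only [List.nil_append]
  have hpow : (fun n : Int => n ^ 2) = (fun n : Int => n * n) := by funext n; ring
  rw [hpow, filter_even_sq (b + 1) ((b + 1 - a).toNat) a rfl,
      filter_odd_sq (b + 1) ((b + 1 - a).toNat) a rfl,
      range_interleave (b + 1) ((b + 1 - a).toNat) a rfl, map_pvInterleave]
  rcases PySem.Int.mod_two_eq a with h | h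
  · have hd : (2 : Int) ∣ a := by rw [pymod_two] at h; omega
    simp [square_it_out_alt, hd]
  · have hd : ¬ (2 : Int) ∣ a := by rw [pymod_two] at h; omega
    simp [square_it_out_alt, hd]
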